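-- pv_equiv track=rewrite | github.com/soupedrocampos/tib-bolsa-de-valores | standardize_fonts.py | tokenize_block
-- ===== SOURCE A (Python) =====
-- TOKEN_MAP = [
--     ("font-size:52px",    "font-size:var(--text-3xl)"),  # 52px = --text-3xl
--     ("font-size:48px",    "font-size:var(--text-2xl)"),  # 48px = --text-2xl
--     ("font-size:34.0px",  "font-size:var(--text-xl)"),   # 34px = --text-xl
--     ("font-size:34px",    "font-size:var(--text-xl)"),
--     ("font-size:28.0px",  "font-size:var(--text-lg)"),   # 28px = --text-lg
--     ("font-size:28px",    "font-size:var(--text-lg)"),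
--     ("font-size:22.0px",  "font-size:var(--text-md)"),   # 22px = --text-md
--     ("font-size:22px",    "font-size:var(--text-md)"),
-- ]
--
-- def tokenize_block(block):
--     """Apply TOKEN_MAP replacements inside a CSS block string."""
--     changes = []
--     for old, new in TOKEN_MAP:
--         count = block.count(old)
--         if count:
--             block = block.replace(old, new)
--             changes.append(f"{old} -> {new.split(':')[1]} x{count}")
--     return block, changes
-- ===== SOURCE B (Python) =====
-- TOKEN_MAP = [
--     ("font-size:52px",    "font-size:var(--text-3xl)"),  # 52px = --text-3xl
--     ("font-size:48px",    "font-size:var(--text-2xl)"),  # 48px = --text-2xl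
--     ("font-size:34.0px",  "font-size:var(--text-xl)"),   # 34px = --text-xl
--     ("font-size:34px",    "font-size:var(--text-xl)"),
--     ("font-size:28.0px",  "font-size:var(--text-lg)"),   # 28px = --text-lg
--     ("font-size:28px",    "font-size:var(--text-lg)"),
--     ("font-size:22.0px",  "font-size:var(--text-md)"),   # 22px = --text-md
--     ("font-size:22px",    "font-size:var(--text-md)"),
-- ]
--
-- def tokenize_block(block):
--     """Apply TOKEN_MAP replacements inside a CSS block string.
--
--     Single left-to-right scan: at each position try the tokens once,
--     emit the replacement and bump a per-token counter on a hit;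
--     the change log is assembled afterwards from the counters.
--     """
--     counts = {}
--     chunks = []
--     i, n = 0, len(block)
--     while i < n:
--         for old, new in TOKEN_MAP:
--             if block.startswith(old, i):
--                 counts[old] = counts.get(old, 0) + 1
--                 chunks.append(new)
--                 i += len(old)
--                 break
--         else:
--             chunks.append(block[i])
--             i += 1
--     changes = [f"{old} -> {new.split(':')[1]} x{counts[old]}"
--                for old, new in TOKEN_MAP if old in counts]
--     return "".join(chunks), changes
-- ===== Notes on version B (the rewrite author's own statement) =====
-- stated objective: alternative
-- what changed: Replaced the eight sequential count-then-replace passes over the whole string with a single left-to-right scan that, at each position, tries the tokens once, emits replacement chunks and per-token counters in one traversal, assembling the change log from the counters afterwards.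
import Mathlib
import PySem

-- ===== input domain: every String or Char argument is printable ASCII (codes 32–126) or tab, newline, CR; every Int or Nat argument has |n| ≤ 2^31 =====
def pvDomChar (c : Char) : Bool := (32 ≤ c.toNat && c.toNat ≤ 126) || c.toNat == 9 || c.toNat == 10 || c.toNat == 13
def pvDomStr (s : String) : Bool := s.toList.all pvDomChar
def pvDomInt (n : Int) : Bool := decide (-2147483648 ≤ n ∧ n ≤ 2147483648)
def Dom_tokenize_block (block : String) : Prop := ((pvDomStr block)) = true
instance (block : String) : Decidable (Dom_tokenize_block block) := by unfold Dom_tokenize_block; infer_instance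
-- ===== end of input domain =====

-- B replaces A's eight sequential count-then-replace passes by a single left-to-right
-- scan that emits chunks and per-token counters in one traversal (objective: alternative).

-- ===== PORT A =====
def TOKEN_MAP : List (String × String) :=
  [("font-size:52px",    "font-size:var(--text-3xl)"),
   ("font-size:48px",    "font-size:var(--text-2xl)"),
   ("font-size:34.0px",  "font-size:var(--text-xl)"),
   ("font-size:34px",    "font-size:var(--text-xl)"),
   ("font-size:28.0px",  "font-size:var(--text-lg)"),
   ("font-size:28px",    "font-size:var(--text-lg)"),
   ("font-size:22.0px",  "font-size:var(--text-md)"),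
   ("font-size:22px",    "font-size:var(--text-md)")]

-- one iteration of A's `for old, new in TOKEN_MAP` loop body
-- (`new.split(':')[1]`: the index is always in range for TOKEN_MAP's constants,
--  ported as `getD` with dummy defaults that are never used)
def tokenizeStepA (st : String × List String) (p : String × String) : String × List String :=
  let count : Int := (PySem.Str.count st.1 p.1 : Nat)
  if count ≠ 0 then
    (PySem.Str.replace st.1 p.1 p.2,
     st.2 ++ [p.1 ++ " -> " ++ ((PySem.Str.split? p.2 ":").getD []).getD 1 "" ++ " x" ++ PySem.Int.toStr count])
  else st

def tokenize_block (block : String) : String × List String :=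
  TOKEN_MAP.foldl tokenizeStepA (block, [])

-- ===== PORT B =====
-- the `while i < n` scan of Source B; `block.startswith(old, i)` is ported, exactly,
-- as `old.toList` being a prefix of `block.toList.drop i`
def tokenizeAltGo (block : List Char) (i : Nat)
    (counts : PySem.Dict String Int) (chunks : List String) :
    PySem.Dict String Int × List String :=
  if h : i < block.length then
    match hf : TOKEN_MAP.find? (fun p => PySem.Chars.startswith (block.drop i) p.1.toList) with
    | some p =>
        tokenizeAltGo block (i + p.1.toList.length)
          (counts.insert p.1 (counts.getD p.1 0 + 1)) (chunks ++ [p.2])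
    | none =>
        tokenizeAltGo block (i + 1) counts (chunks ++ [String.singleton (block[i]'h)])
  else (counts, chunks)
termination_by block.length - i
decreasing_by
  · have hm := List.mem_of_find?_eq_some hf
    have hl : 0 < p.1.toList.length := by fin_cases hm <;> decide
    omega
  · omega

-- `counts[old]` in the comprehension: the key is present by the `old in counts` guard,
-- ported as `getD 0` (exact here)
def tokenize_block_alt (block : String) : String × List String :=
  let r := tokenizeAltGo block.toList 0 PySem.Dict.empty []
  let counts := r.1
  let chunks := r.2
  (PySem.Str.join "" chunks,
   (TOKEN_MAP.filter (fun p => counts.contains p.1)).map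
     (fun p => p.1 ++ " -> " ++ ((PySem.Str.split? p.2 ":").getD []).getD 1 "" ++ " x" ++
       PySem.Int.toStr (counts.getD p.1 0)))

-- ===== PRECONDITION & SPEC =====
def Spec_tokenize_block (block : String) (out : String × List String) : Prop := out = tokenize_block_alt block
instance (block : String) (out : String × List String) : Decidable (Spec_tokenize_block block out) := by unfold Spec_tokenize_block; infer_instance

-- ===== CLAIM (what is proved, stated in full; the proofs are below) =====
def Claim_equal_tokenize_block : Prop := ∀ (block : String), Dom_tokenize_block block → Spec_tokenize_block block (tokenize_block block)

-- ===== LEMMAS AND PROOFS =====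

-- token table as indexed accessors ('f'/"f" defaults keep the head-'f' facts universal in k)
def strOld (k : Nat) : String := (TOKEN_MAP.getD k ("f", "f")).1
def strNew (k : Nat) : String := (TOKEN_MAP.getD k ("f", "f")).2
def oldT (k : Nat) : List Char := (strOld k).toList
def newT (k : Nat) : List Char := (strNew k).toList
def TMp (k : Nat) : String × String := (strOld k, strNew k)

lemma tm_len : TOKEN_MAP.length = 8 := by decide

lemma strOld_default {k : Nat} (h : 8 ≤ k) : strOld k = "f" := by
  unfold strOld; rw [List.getD_eq_default _ _ (tm_len ▸ h)]

lemma strNew_default {k : Nat} (h : 8 ≤ k) : strNew k = "f" := by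
  unfold strNew; rw [List.getD_eq_default _ _ (tm_len ▸ h)]

lemma oldT_pos (k : Nat) : 0 < (oldT k).length := by
  rcases Nat.lt_or_ge k 8 with h | h
  · interval_cases k <;> decide
  · unfold oldT; rw [strOld_default h]; decide

lemma oldT_ne_nil (k : Nat) : oldT k ≠ [] :=
  List.ne_nil_of_length_pos (oldT_pos k)

lemma headF_old (k : Nat) : (oldT k).head? = some 'f' := by
  rcases Nat.lt_or_ge k 8 with h | h
  · interval_cases k <;> decide
  · unfold oldT; rw [strOld_default h]; decide

lemma headF_new (k : Nat) : (newT k).head? = some 'f' := by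
  rcases Nat.lt_or_ge k 8 with h | h
  · interval_cases k <;> decide
  · unfold newT; rw [strNew_default h]; decide

lemma tailNoF_old (k : Nat) : 'f' ∉ (oldT k).drop 1 := by
  rcases Nat.lt_or_ge k 8 with h | h
  · interval_cases k <;> decide
  · unfold oldT; rw [strOld_default h]; decide

lemma tailNoF_new (k : Nat) : 'f' ∉ (newT k).drop 1 := by
  rcases Nat.lt_or_ge k 8 with h | h
  · interval_cases k <;> decide
  · unfold newT; rw [strNew_default h]; decide

lemma two_le_oldT {k : Nat} (h : k < 8) : 2 ≤ (oldT k).length := by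
  interval_cases k <;> decide

lemma strOld_inj {j k : Nat} (hj : j < 8) (hk : k < 8) (h : strOld j = strOld k) : j = k := by
  interval_cases j <;> interval_cases k <;> first | rfl | (exfalso; revert h; decide)

-- the item list: a position either starts one of the 8 tokens or contributes its character
inductive PItem where
  | tok : Nat → PItem
  | chr : Char → PItem
deriving DecidableEq, Repr

def scan : List Char → List PItem
  | [] => []
  | c :: t =>
    match (List.range 8).find? (fun k => (oldT k).isPrefixOf (c :: t)) with
    | some k => PItem.tok k :: scan ((c :: t).drop (oldT k).length)
    | none => PItem.chr c :: scan t
termination_by s => s.length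
decreasing_by
  · have := oldT_pos k; simp; omega
  · simp

def render (g : Nat → List Char) (its : List PItem) : List Char :=
  its.flatMap (fun it => match it with | PItem.tok k => g k | PItem.chr c => [c])

def tokcount (k : Nat) (its : List PItem) : Nat := its.count (PItem.tok k)

@[simp] lemma render_nil (g : Nat → List Char) : render g [] = [] := rfl
@[simp] lemma render_tok (g : Nat → List Char) (k : Nat) (rest : List PItem) :
    render g (PItem.tok k :: rest) = g k ++ render g rest := rfl
@[simp] lemma render_chr (g : Nat → List Char) (c : Char) (rest : List PItem) :
    render g (PItem.chr c :: rest) = c :: render g rest := rfl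

-- clean (accumulator-free) versions of Python's str.replace / str.count
def repl (old nw : List Char) : List Char → List Char
  | [] => []
  | c :: t =>
    if h : old ≠ [] ∧ old.isPrefixOf (c :: t) then nw ++ repl old nw ((c :: t).drop old.length)
    else c :: repl old nw t
termination_by l => l.length
decreasing_by
  · have : 0 < old.length := List.length_pos_of_ne_nil h.1
    simp; omega
  · simp

def cnt (old : List Char) : List Char → Nat
  | [] => 0
  | c :: t =>
    if h : old ≠ [] ∧ old.isPrefixOf (c :: t) then cnt old ((c :: t).drop old.length) + 1
    else cnt old t
termination_by l => l.length
decreasing_by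
  · have : 0 < old.length := List.length_pos_of_ne_nil h.1
    simp; omega
  · simp

@[simp] lemma repl_nil (old nw : List Char) : repl old nw [] = [] := by simp [repl]
@[simp] lemma cnt_nil (old : List Char) : cnt old [] = 0 := by simp [cnt]

lemma repl_pos (old nw Z : List Char) (h : old ≠ []) :
    repl old nw (old ++ Z) = nw ++ repl old nw Z := by
  cases old with
  | nil => exact absurd rfl h
  | cons o ot =>
    rw [List.cons_append, repl]
    rw [dif_pos ⟨h, List.isPrefixOf_iff_prefix.mpr ⟨Z, by simp⟩⟩]
    congr 1
    rw [← List.cons_append, List.drop_left]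

lemma cnt_pos (old Z : List Char) (h : old ≠ []) :
    cnt old (old ++ Z) = cnt old Z + 1 := by
  cases old with
  | nil => exact absurd rfl h
  | cons o ot =>
    rw [List.cons_append, cnt]
    rw [dif_pos ⟨h, List.isPrefixOf_iff_prefix.mpr ⟨Z, by simp⟩⟩]
    congr 1
    rw [← List.cons_append, List.drop_left]

lemma repl_neg (old nw : List Char) (c : Char) (t : List Char) (h : ¬ old <+: (c :: t)) :
    repl old nw (c :: t) = c :: repl old nw t := by
  rw [repl, dif_neg (by rintro ⟨-, hp⟩; exact h (List.isPrefixOf_iff_prefix.mp hp))]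

lemma cnt_neg (old : List Char) (c : Char) (t : List Char) (h : ¬ old <+: (c :: t)) :
    cnt old (c :: t) = cnt old t := by
  rw [cnt, dif_neg (by rintro ⟨-, hp⟩; exact h (List.isPrefixOf_iff_prefix.mp hp))]

-- a guaranteed character mismatch of w against token k within both lengths
def misB (w : List Char) (k : Nat) : Bool :=
  (List.range w.length).any (fun p => decide (p < (oldT k).length) && (w[p]? != (oldT k)[p]?))

lemma mis_old {j k : Nat} (hj : j < 8) (hk : k < 8) (hne : j ≠ k) : misB (oldT j) k = true := by
  interval_cases j <;> interval_cases k <;> revert hne <;> decide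

lemma mis_new {j k : Nat} (hj : j < 8) (hk : k < 8) : misB (newT j) k = true := by
  interval_cases j <;> interval_cases k <;> decide

lemma notPrefix_of_misB {w : List Char} {k : Nat} (h : misB w k = true) (X : List Char) :
    ¬ oldT k <+: (w ++ X) := by
  obtain ⟨p, hp, hcond⟩ := List.any_eq_true.mp h
  rw [List.mem_range] at hp
  obtain ⟨hlt, hne⟩ := Bool.and_eq_true_iff.mp hcond
  rw [decide_eq_true_iff] at hlt
  rw [bne_iff_ne] at hne
  rintro ⟨t, ht⟩
  apply hne
  rw [← List.getElem?_append_left (l₂ := X) hp, ← ht, List.getElem?_append_left hlt]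

lemma skip_gen (k : Nat) :
    ∀ (w X : List Char), (∀ m, m < w.length → ¬ oldT k <+: (w.drop m ++ X)) →
      repl (oldT k) (newT k) (w ++ X) = w ++ repl (oldT k) (newT k) X ∧
      cnt (oldT k) (w ++ X) = cnt (oldT k) X := by
  intro w
  induction w with
  | nil => intro X _; simp
  | cons c w' ih =>
    intro X h
    have h0 : ¬ oldT k <+: (c :: (w' ++ X)) := by
      have := h 0 (by simp)
      simpa using this
    have ihX := ih X (fun m hm => by
      have := h (m + 1) (by simp; omega)
      simpa using this)
    constructor
    · rw [List.cons_append, repl_neg _ _ _ _ h0, ihX.1, List.cons_append]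
    · rw [List.cons_append, cnt_neg _ _ _ h0, ihX.2]

lemma hno_of {k : Nat} {w : List Char} (hmis : misB w k = true)
    (htail : 'f' ∉ w.drop 1) (X : List Char) :
    ∀ m, m < w.length → ¬ oldT k <+: (w.drop m ++ X) := by
  intro m hm hpre
  rcases Nat.eq_zero_or_pos m with rfl | hm1
  · exact notPrefix_of_misB hmis X (by simpa using hpre)
  · -- the head of w.drop m is a char of w.drop 1, hence not 'f'; but oldT k starts with 'f'
    have hhead : (w.drop m ++ X).head? = w[m]? := by
      rw [List.head?_append, List.head?_drop]
      rw [List.getElem?_eq_getElem hm]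
      simp
    have hf : (w.drop m ++ X).head? = some 'f' := by
      obtain ⟨t, ht⟩ := hpre
      have hOld := headF_old k
      cases hO : oldT k with
      | nil => rw [hO] at hOld; simp at hOld
      | cons a u =>
        rw [hO] at hOld; simp at hOld
        rw [← ht, hO, hOld]; simp
    rw [hhead] at hf
    apply htail
    have : (w.drop 1)[m - 1]? = some 'f' := by
      rw [List.getElem?_drop]
      have : 1 + (m - 1) = m := by omega
      rw [this]; exact hf
    exact List.mem_of_getElem? this

-- prefix tests by a token-tail (no 'f' inside) cannot distinguish renderings
lemma transfer (g h : Nat → List Char)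
    (hg : ∀ k, (g k).head? = some 'f') (hh : ∀ k, (h k).head? = some 'f') :
    ∀ (its : List PItem) (u : List Char), u ≠ [] → 'f' ∉ u →
      (u <+: render g its ↔ u <+: render h its) := by
  intro its
  induction its with
  | nil =>
    intro u hne _
    simp [List.prefix_nil, hne]
  | cons it rest ih =>
    intro u hne hnf
    cases it with
    | tok j =>
      obtain ⟨c, u', rfl⟩ : ∃ c u', u = c :: u' := by
        cases u with | nil => exact absurd rfl hne | cons c u' => exact ⟨c, u', rfl⟩
      have hcf : c ≠ 'f' := fun hc => hnf (by rw [hc]; simp)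
      have hgj := hg j; have hhj := hh j
      constructor
      · intro hp
        exfalso
        apply hcf
        rw [render_tok] at hp
        obtain ⟨t, ht⟩ := hp
        have := congrArg List.head? ht
        rw [List.head?_append] at this
        simp [List.head?_append, hgj] at this
        exact this
      · intro hp
        exfalso
        apply hcf
        rw [render_tok] at hp
        obtain ⟨t, ht⟩ := hp
        have := congrArg List.head? ht
        simp [List.head?_append, hhj] at this
        exact this
    | chr c =>
      obtain ⟨x, u', rfl⟩ : ∃ x u', u = x :: u' := by
        cases u with | nil => exact absurd rfl hne | cons x u' => exact ⟨x, u', rfl⟩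
      rw [render_chr, render_chr, List.cons_prefix_cons, List.cons_prefix_cons]
      rcases eq_or_ne u' [] with rfl | hu'
      · simp
      · have := ih u' hu' (fun hm => hnf (List.mem_cons_of_mem _ hm))
        rw [this]

lemma render_scan (s : List Char) : render oldT (scan s) = s := by
  induction s using scan.induct with
  | case1 => simp [scan]
  | case2 c t k hf ih =>
    rw [scan, hf, render_tok]
    have hpred := List.find?_some hf
    have hpre : oldT k <+: (c :: t) := by
      simpa [List.isPrefixOf_iff_prefix] using hpred
    obtain ⟨z, hz⟩ := hpre
    rw [← hz, List.drop_left] at ih ⊢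
    rw [ih]
  | case3 c t hf ih =>
    rw [scan, hf, render_chr, ih]

lemma wf_scan (s : List Char) : ∀ j, PItem.tok j ∈ scan s → j < 8 := by
  induction s using scan.induct with
  | case1 => simp [scan]
  | case2 c t k hf ih =>
    intro j hj
    rw [scan, hf] at hj
    rcases List.mem_cons.mp hj with h | h
    · have := List.mem_of_find?_eq_some hf
      rw [PItem.tok.injEq] at h
      rw [h]; simpa [List.mem_range] using this
    · exact ih j h
  | case3 c t hf ih =>
    intro j hj
    rw [scan, hf] at hj
    rcases List.mem_cons.mp hj with h | h
    · simp at h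
    · exact ih j h

-- one replace/count pass of A over any intermediate rendering hits exactly the .tok k items
lemma main_lemma (k : Nat) (hk : k < 8) (s : List Char) :
    ∀ (g : Nat → List Char), g k = oldT k → (∀ j, g j = oldT j ∨ g j = newT j) →
      repl (oldT k) (newT k) (render g (scan s)) =
        render (fun j => if j = k then newT k else g j) (scan s) ∧
      cnt (oldT k) (render g (scan s)) = tokcount k (scan s) := by
  induction s using scan.induct with
  | case1 =>
    intro g hgk hgo
    simp [scan, tokcount]
  | case2 c t j hf ih =>
    intro g hgk hgo
    have hj8 : j < 8 := by
      have := List.mem_of_find?_eq_some hf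
      simpa [List.mem_range] using this
    have hpre : oldT j <+: (c :: t) := by
      simpa [List.isPrefixOf_iff_prefix] using List.find?_some hf
    rw [scan, hf]
    have ihg := ih g hgk hgo
    rcases eq_or_ne j k with rfl | hjk
    · rw [render_tok, hgk, repl_pos _ _ _ (oldT_ne_nil j), cnt_pos _ _ (oldT_ne_nil j), ihg.2]
      refine ⟨?_, by simp [tokcount]⟩
      rw [ihg.1, render_tok, if_pos rfl]
    · have hskip :
          repl (oldT k) (newT k) (g j ++ render g (scan ((c :: t).drop (oldT j).length))) =
            g j ++ repl (oldT k) (newT k) (render g (scan ((c :: t).drop (oldT j).length))) ∧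
          cnt (oldT k) (g j ++ render g (scan ((c :: t).drop (oldT j).length))) =
            cnt (oldT k) (render g (scan ((c :: t).drop (oldT j).length))) := by
        rcases hgo j with hgj | hgj
        · exact skip_gen k (g j) _
            (by rw [hgj]; exact hno_of (mis_old hj8 hk hjk) (tailNoF_old j) _)
        · exact skip_gen k (g j) _
            (by rw [hgj]; exact hno_of (mis_new hj8 hk) (tailNoF_new j) _)
      constructor
      · rw [render_tok, hskip.1, ihg.1, render_tok, if_neg hjk]
      · rw [render_tok, hskip.2, ihg.2]
        simp [tokcount, hjk]
  | case3 c t hf ih =>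
    intro g hgk hgo
    have hnone : ∀ j, j < 8 → ¬ oldT j <+: (c :: t) := by
      intro j hj hp
      have := List.find?_eq_none.mp hf j (by simpa [List.mem_range] using hj)
      exact this (List.isPrefixOf_iff_prefix.mpr hp)
    rw [scan, hf]
    have hgf : ∀ j, (g j).head? = some 'f' := by
      intro j
      rcases hgo j with h | h
      · rw [h]; exact headF_old j
      · rw [h]; exact headF_new j
    have hnp : ¬ oldT k <+: (c :: render g (scan t)) := by
      intro hp
      obtain ⟨a, u, hO⟩ : ∃ a u, oldT k = a :: u := by
        cases hO : oldT k with
        | nil => exact absurd hO (oldT_ne_nil k)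
        | cons a u => exact ⟨a, u, rfl⟩
      have ha : a = 'f' := by
        have := headF_old k; rw [hO] at this; simpa using this
      have hu2 : u ≠ [] := by
        have := two_le_oldT hk
        rw [hO] at this
        intro hu; rw [hu] at this; simp at this
      have hunf : 'f' ∉ u := by
        have := tailNoF_old k
        rw [hO] at this; simpa using this
      rw [hO, List.cons_prefix_cons] at hp
      have hcu : u <+: render g (scan t) := hp.2
      have : u <+: render oldT (scan t) :=
        (transfer g oldT hgf headF_old (scan t) u hu2 hunf).mp hcu
      rw [render_scan] at this
      exact hnone k hk (by rw [hO, ← hp.1, ha, List.cons_prefix_cons]; exact ⟨rfl, this⟩)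
    have iht := ih g hgk hgo
    refine ⟨?_, ?_⟩
    · rw [render_chr, repl_neg _ _ _ _ hnp, iht.1, render_chr]
    · rw [render_chr, cnt_neg _ _ _ hnp, iht.2]
      simp [tokcount]

-- bridge the fuel/accumulator loops of PySem.Chars.replace/count to repl/cnt
lemma go_repl (old nw : List Char) (hne : old ≠ []) :
    ∀ (fuel : Nat) (s acc : List Char), s.length ≤ fuel →
      PySem.Chars.replace.go old nw fuel s acc = acc.reverse ++ repl old nw s := by
  intro fuel
  induction fuel with
  | zero =>
    intro s acc hs
    have : s = [] := List.eq_nil_of_length_eq_zero (by omega)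
    subst this
    simp [PySem.Chars.replace.go]
  | succ f ih =>
    intro s acc hs
    cases s with
    | nil => simp [PySem.Chars.replace.go]
    | cons c t =>
      by_cases hp : old.isPrefixOf (c :: t)
      · have hlen : 0 < old.length := List.length_pos_of_ne_nil hne
        rw [PySem.Chars.replace.go]
        simp only [hp, if_true]
        rw [ih _ _ (by simp at hs ⊢; omega)]
        rw [repl, dif_pos ⟨hne, hp⟩]
        simp
      · rw [PySem.Chars.replace.go]
        simp only [hp]
        rw [if_neg (by simp), ih _ _ (by simp at hs ⊢; omega)]
        rw [repl, dif_neg (by rintro ⟨-, h2⟩; exact hp h2)]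
        simp

lemma go_cnt (old : List Char) (hne : old ≠ []) :
    ∀ (fuel : Nat) (s : List Char) (acc : Nat), s.length ≤ fuel →
      PySem.Chars.count.go old fuel s acc = acc + cnt old s := by
  intro fuel
  induction fuel with
  | zero =>
    intro s acc hs
    have : s = [] := List.eq_nil_of_length_eq_zero (by omega)
    subst this
    simp [PySem.Chars.count.go]
  | succ f ih =>
    intro s acc hs
    cases s with
    | nil => simp [PySem.Chars.count.go]
    | cons c t =>
      by_cases hp : old.isPrefixOf (c :: t)
      · have hlen : 0 < old.length := List.length_pos_of_ne_nil hne
        rw [PySem.Chars.count.go]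
        simp only [hp, if_true]
        rw [ih _ _ (by simp at hs ⊢; omega)]
        rw [cnt, dif_pos ⟨hne, hp⟩]
        omega
      · rw [PySem.Chars.count.go]
        simp only [hp]
        rw [if_neg (by simp), ih _ _ (by simp at hs ⊢; omega)]
        rw [cnt, dif_neg (by rintro ⟨-, h2⟩; exact hp h2)]

lemma replace_eq_repl (s old nw : List Char) (hne : old ≠ []) :
    PySem.Chars.replace s old nw = repl old nw s := by
  rw [PySem.Chars.replace, if_neg (by simp [hne])]
  rw [go_repl old nw hne s.length s [] le_rfl]
  simp

lemma count_eq_cnt (s old : List Char) (hne : old ≠ []) :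
    PySem.Chars.count s old = cnt old s := by
  rw [PySem.Chars.count, if_neg (by simp [hne])]
  rw [go_cnt old hne s.length s 0 le_rfl]
  omega

def msgT (k : Nat) (c : Int) : String :=
  strOld k ++ " -> " ++ ((PySem.Str.split? (strNew k) ":").getD []).getD 1 "" ++ " x" ++
    PySem.Int.toStr c

-- A's loop over a set of still-unprocessed token indices, on any intermediate rendering
lemma pipe (s0 : List Char) :
    ∀ (ks : List Nat), (∀ k ∈ ks, k < 8) → ks.Nodup →
      ∀ (g : Nat → List Char), (∀ j, g j = oldT j ∨ g j = newT j) →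
        (∀ k ∈ ks, g k = oldT k) →
        ∀ (st : String) (ch : List String), st.toList = render g (scan s0) →
          (((ks.map TMp).foldl tokenizeStepA (st, ch)).1.toList =
              render (fun j => if j ∈ ks ∧ tokcount j (scan s0) ≠ 0 then newT j else g j) (scan s0)) ∧
          ((ks.map TMp).foldl tokenizeStepA (st, ch)).2 =
            ch ++ ks.filterMap (fun k =>
              if tokcount k (scan s0) ≠ 0 then some (msgT k (tokcount k (scan s0))) else none) := by
  intro ks
  induction ks with
  | nil =>
    intro _ _ g hgo _ st ch hst
    refine ⟨?_, by simp⟩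
    simpa using hst
  | cons k ks' ih =>
    intro hks hnd g hgo hgk st ch hst
    have hk8 : k < 8 := hks k (List.mem_cons_self ..)
    have hcount :
        PySem.Str.count st (strOld k) = tokcount k (scan s0) := by
      rw [PySem.Str.count_eq, hst]
      show PySem.Chars.count (render g (scan s0)) (oldT k) = tokcount k (scan s0)
      rw [count_eq_cnt _ _ (oldT_ne_nil k)]
      exact (main_lemma k hk8 s0 g (hgk k (List.mem_cons_self ..)) hgo).2
    rw [List.map_cons, List.foldl_cons]
    by_cases hz : tokcount k (scan s0) ≠ 0
    · have hstep : tokenizeStepA (st, ch) (TMp k) =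
          (PySem.Str.replace st (strOld k) (strNew k), ch ++ [msgT k (tokcount k (scan s0))]) := by
        simp only [tokenizeStepA, TMp]
        rw [hcount, if_pos (by exact_mod_cast hz)]
        rfl
      rw [hstep]
      have hrepl : (PySem.Str.replace st (strOld k) (strNew k)).toList =
          render (fun j => if j = k then newT j else g j) (scan s0) := by
        rw [PySem.Str.toList_replace, hst]
        show PySem.Chars.replace (render g (scan s0)) (oldT k) (newT k) = _
        rw [replace_eq_repl _ _ _ (oldT_ne_nil k)]
        have := (main_lemma k hk8 s0 g (hgk k (List.mem_cons_self ..)) hgo).1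
        rw [this]
        congr 1
        funext j
        by_cases hj : j = k <;> simp [hj]
      have ihres := ih (fun k' hk' => hks k' (List.mem_cons_of_mem _ hk'))
        (List.Nodup.of_cons hnd)
        (fun j => if j = k then newT j else g j)
        (fun j => by by_cases hj : j = k <;> simp [hj, hgo j])
        (fun k' hk' => by
          have hne : k' ≠ k := fun h => (List.nodup_cons.mp hnd).1 (h ▸ hk')
          simp [hne, hgk k' (List.mem_cons_of_mem _ hk')])
        (PySem.Str.replace st (strOld k) (strNew k)) (ch ++ [msgT k (tokcount k (scan s0))]) hrepl
      refine ⟨?_, ?_⟩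
      · rw [ihres.1]
        congr 1
        funext j
        beta_reduce
        by_cases hj : j ∈ ks' ∧ tokcount j (scan s0) ≠ 0
        · rw [if_pos hj, if_pos ⟨List.mem_cons_of_mem _ hj.1, hj.2⟩]
        · rw [if_neg hj]
          by_cases hjk : j = k
          · subst hjk
            simp [hz]
          · rw [if_neg hjk, if_neg (by
              rintro ⟨hm, hc⟩
              rcases List.mem_cons.mp hm with h | h
              · exact hjk h
              · exact hj ⟨h, hc⟩)]
      · rw [ihres.2, List.filterMap_cons, if_pos hz]
        simp
    · have hstep : tokenizeStepA (st, ch) (TMp k) = (st, ch) := by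
        simp only [tokenizeStepA, TMp]
        rw [hcount, if_neg (by simpa using hz)]
      rw [hstep]
      have ihres := ih (fun k' hk' => hks k' (List.mem_cons_of_mem _ hk'))
        (List.Nodup.of_cons hnd) g hgo
        (fun k' hk' => hgk k' (List.mem_cons_of_mem _ hk')) st ch hst
      refine ⟨?_, ?_⟩
      · rw [ihres.1]
        congr 1
        funext j
        beta_reduce
        by_cases hj : j ∈ ks' ∧ tokcount j (scan s0) ≠ 0
        · rw [if_pos hj, if_pos ⟨List.mem_cons_of_mem _ hj.1, hj.2⟩]
        · rw [if_neg hj]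
          by_cases hjk : j = k
          · subst hjk
            rw [if_neg (by rintro ⟨-, hc⟩; exact hz hc)]
          · rw [if_neg (by
              rintro ⟨hm, hc⟩
              rcases List.mem_cons.mp hm with h | h
              · exact hjk h
              · exact hj ⟨h, hc⟩)]
      · rw [ihres.2, List.filterMap_cons, if_neg hz]

lemma tm_eq : TOKEN_MAP = (List.range 8).map TMp := by decide

def chunkOf : PItem → String
  | PItem.tok k => strNew k
  | PItem.chr c => String.singleton c

def keysOf (its : List PItem) : List String :=
  its.filterMap (fun it => match it with
    | PItem.tok k => some (strOld k)
    | PItem.chr _ => none)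

def cFold (d : PySem.Dict String Int) (its : List PItem) : PySem.Dict String Int :=
  its.foldl (fun d it => match it with
    | PItem.tok k => d.insert (strOld k) (d.getD (strOld k) 0 + 1)
    | PItem.chr _ => d) d

-- B's scan loop computes exactly the items of `scan`
lemma bgo (s0 : List Char) : ∀ (i : Nat) (counts : PySem.Dict String Int) (chunks : List String),
    tokenizeAltGo s0 i counts chunks =
      (cFold counts (scan (s0.drop i)), chunks ++ (scan (s0.drop i)).map chunkOf) := by
  intro i counts chunks
  induction i, counts, chunks using tokenizeAltGo.induct s0 with
  | case1 i counts chunks h p hf ih =>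
    obtain ⟨c, t, hct⟩ : ∃ c t, s0.drop i = c :: t := by
      cases hd : s0.drop i with
      | nil =>
        have : s0.length - i = 0 := by rw [← List.length_drop, hd]; rfl
        omega
      | cons c t => exact ⟨c, t, rfl⟩
    have hf2 := hf
    have hpredeq : ((fun p : String × String => PySem.Chars.startswith (s0.drop i) p.1.toList) ∘ TMp)
        = (fun k => (oldT k).isPrefixOf (s0.drop i)) := rfl
    rw [tm_eq, List.find?_map, hpredeq] at hf2
    obtain ⟨k, hk, rfl⟩ : ∃ k,
        (List.range 8).find? (fun k => (oldT k).isPrefixOf (s0.drop i)) = some k ∧ p = TMp k := by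
      cases hr : (List.range 8).find? (fun k => (oldT k).isPrefixOf (s0.drop i)) with
      | none => rw [hr] at hf2; simp at hf2
      | some k => rw [hr] at hf2; simp at hf2; exact ⟨k, rfl, hf2.symm⟩
    have hscan : scan (s0.drop i) = PItem.tok k :: scan (s0.drop (i + (oldT k).length)) := by
      have hk' := hk
      rw [hct] at hk'
      rw [hct, scan, hk', ← hct]
      simp only [List.drop_drop]
    rw [tokenizeAltGo, dif_pos h]
    split
    next p' hf' =>
      rw [hf] at hf'
      obtain rfl : p' = TMp k := (Option.some.inj hf').symm
      rw [ih, hscan]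
      refine Prod.ext ?_ ?_
      · show cFold _ (scan (s0.drop (i + (oldT k).length))) = cFold counts (PItem.tok k :: _)
        rfl
      · show (chunks ++ [(TMp k).2]) ++ _ = chunks ++ List.map chunkOf (PItem.tok k :: _)
        have hlen : (oldT k).length = (strOld k).length := by simp [oldT]
        simp [chunkOf, TMp, hlen]
    next hf' =>
      rw [hf] at hf'
      simp at hf'
  | case2 i counts chunks h hf ih =>
    have hf2 := hf
    rw [tm_eq, List.find?_map] at hf2
    have hpredeq : ((fun p : String × String => PySem.Chars.startswith (s0.drop i) p.1.toList) ∘ TMp)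
        = (fun k => (oldT k).isPrefixOf (s0.drop i)) := rfl
    rw [hpredeq] at hf2
    have hr : (List.range 8).find? (fun k => (oldT k).isPrefixOf (s0.drop i)) = none := by
      cases hr : (List.range 8).find? (fun k => (oldT k).isPrefixOf (s0.drop i)) with
      | none => rfl
      | some k => rw [hr] at hf2; simp at hf2
    have hct : s0.drop i = s0[i] :: s0.drop (i + 1) := List.drop_eq_getElem_cons h
    have hscan : scan (s0.drop i) = PItem.chr s0[i] :: scan (s0.drop (i + 1)) := by
      have hr' := hr
      rw [hct] at hr'
      rw [hct, scan, hr']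
    rw [tokenizeAltGo, dif_pos h]
    split
    next p' hf' =>
      rw [hf] at hf'
      simp at hf'
    next hf' =>
      rw [ih, hscan]
      refine Prod.ext ?_ ?_
      · rfl
      · show (chunks ++ [String.singleton s0[i]]) ++ _ = chunks ++ List.map chunkOf (PItem.chr s0[i] :: _)
        simp [chunkOf]
  | case3 i counts chunks h =>
    have : s0.drop i = [] := List.drop_eq_nil_of_le (by omega)
    rw [tokenizeAltGo, dif_neg h, this]
    simp [scan, cFold]

lemma cFold_eq : ∀ (its : List PItem) (d : PySem.Dict String Int),
    cFold d its = (keysOf its).foldl (fun d x => d.insert x (d.getD x 0 + 1)) d := by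
  intro its
  induction its with
  | nil => intro d; rfl
  | cons it rest ih =>
    intro d
    cases it with
    | tok k => simp [cFold, keysOf, List.foldl_cons] at ih ⊢; exact ih _
    | chr c => simp [cFold, keysOf, List.foldl_cons] at ih ⊢; exact ih _

lemma getD_empty_int (v : String) : (PySem.Dict.empty : PySem.Dict String Int).getD v 0 = 0 := by
  simp [PySem.Dict.getD, PySem.Dict.get?_empty]

lemma getD_cFold (its : List PItem) (v : String) :
    (cFold PySem.Dict.empty its).getD v 0 = ((keysOf its).count v : Int) := by
  rw [cFold_eq, PySem.Dict.getD_foldl_insert_add_one, getD_empty_int]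
  omega

lemma contains_foldl : ∀ (l : List String) (d : PySem.Dict String Int) (v : String),
    (l.foldl (fun d x => d.insert x (d.getD x 0 + 1)) d).contains v = (d.contains v || decide (v ∈ l)) := by
  intro l
  induction l with
  | nil => intro d v; simp
  | cons x l' ih =>
    intro d v
    rw [List.foldl_cons, ih, PySem.Dict.contains_insert]
    by_cases hvx : v = x
    · simp [hvx, List.mem_cons]
    · have hb : (v == x) = false := beq_eq_false_iff_ne.mpr hvx
      simp [hb, List.mem_cons, hvx]

lemma contains_cFold (its : List PItem) (v : String) :
    (cFold PySem.Dict.empty its).contains v = decide (v ∈ keysOf its) := by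
  rw [cFold_eq, contains_foldl, PySem.Dict.contains_empty, Bool.false_or]

lemma keysOf_count : ∀ (its : List PItem), (∀ j, PItem.tok j ∈ its → j < 8) →
    ∀ k, k < 8 → (keysOf its).count (strOld k) = tokcount k its := by
  intro its
  induction its with
  | nil => intro _ k _; rfl
  | cons it rest ih =>
    intro hwf k hk
    have ihk := ih (fun j hj => hwf j (List.mem_cons_of_mem _ hj)) k hk
    cases it with
    | tok j =>
      have hj8 : j < 8 := hwf j (List.mem_cons_self ..)
      show List.count (strOld k) (strOld j :: keysOf rest) = List.count (PItem.tok k) (PItem.tok j :: rest)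
      rw [List.count_cons, List.count_cons, ihk]
      by_cases hjk : j = k
      · simp [hjk, tokcount]
      · have h1 : ¬ strOld j = strOld k := fun h => hjk (strOld_inj hj8 hk h)
        have h2 : ¬ PItem.tok j = PItem.tok k := by simp [hjk]
        simp [h1, h2, tokcount]
    | chr c =>
      show List.count (strOld k) (keysOf rest) = List.count (PItem.tok k) (PItem.chr c :: rest)
      rw [List.count_cons, ihk]
      simp [tokcount]

lemma render_congr : ∀ (its : List PItem) (g h : Nat → List Char),
    (∀ j, PItem.tok j ∈ its → g j = h j) → render g its = render h its := by
  intro its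
  induction its with
  | nil => intro g h _; rfl
  | cons it rest ih =>
    intro g h hgh
    cases it with
    | tok j =>
      rw [render_tok, render_tok, hgh j (List.mem_cons_self ..),
        ih g h (fun j' hj' => hgh j' (List.mem_cons_of_mem _ hj'))]
    | chr c =>
      rw [render_chr, render_chr, ih g h (fun j' hj' => hgh j' (List.mem_cons_of_mem _ hj'))]

lemma join_chunks : ∀ (its : List PItem),
    PySem.Chars.join [] (List.map String.toList (List.map chunkOf its)) = render newT its := by
  intro its
  induction its with
  | nil => simp [PySem.Chars.join_nil]
  | cons it rest ih =>
    cases rest with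
    | nil =>
      cases it with
      | tok k => simp [PySem.Chars.join_singleton, chunkOf, newT]
      | chr c => simp [PySem.Chars.join_singleton, chunkOf]
    | cons it2 rest2 =>
      simp only [List.map_cons] at ih ⊢
      rw [PySem.Chars.join_cons_cons, List.append_nil, ih]
      cases it with
      | tok k => simp [chunkOf, newT]
      | chr c => simp [chunkOf]

lemma filterMap_if (l : List Nat) (p : Nat → Prop) [DecidablePred p] (f : Nat → String) :
    l.filterMap (fun k => if p k then some (f k) else none) =
      (l.filter (fun k => decide (p k))).map f := by
  induction l with
  | nil => rfl
  | cons x l' ih =>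
    rw [List.filterMap_cons, List.filter_cons]
    by_cases hx : p x <;> simp [hx, ih]

-- ===== VERDICT (by name: the statement is the Claim_ definition above) =====
theorem tokenize_block_spec : Claim_equal_tokenize_block := by
  unfold Claim_equal_tokenize_block
  intro block _
  unfold Spec_tokenize_block
  have hwf := wf_scan block.toList
  have hA := pipe block.toList (List.range 8)
    (fun k hk => List.mem_range.mp hk) List.nodup_range
    oldT (fun _ => Or.inl rfl) (fun k _ => rfl) block [] (render_scan block.toList).symm
  have hAeq : tokenize_block block = ((List.range 8).map TMp).foldl tokenizeStepA (block, []) := by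
    rw [tokenize_block, tm_eq]
  have hB := bgo block.toList 0 PySem.Dict.empty []
  rw [List.drop_zero] at hB
  rw [hAeq]
  simp only [tokenize_block_alt]
  rw [hB]
  simp only [List.nil_append]
  refine Prod.ext ?_ ?_
  · -- the resulting strings agree
    apply String.toList_inj.mp
    rw [hA.1, PySem.Str.toList_join]
    have hsep : ("" : String).toList = ([] : List Char) := rfl
    rw [hsep, join_chunks]
    exact render_congr _ _ newT (fun j hj => by
      have hj8 := hwf j hj
      have hz : tokcount j (scan block.toList) ≠ 0 := by
        have : 0 < List.count (PItem.tok j) (scan block.toList) := List.count_pos_iff.mpr hj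
        simp only [tokcount]
        omega
      rw [if_pos ⟨List.mem_range.mpr hj8, hz⟩])
  · -- the change logs agree
    rw [hA.2, List.nil_append]
    rw [filterMap_if (List.range 8) (fun k => tokcount k (scan block.toList) ≠ 0)
      (fun k => msgT k (tokcount k (scan block.toList)))]
    rw [tm_eq, List.filter_map, List.map_map]
    have hfc : List.filter ((fun p : String × String =>
          (cFold PySem.Dict.empty (scan block.toList)).contains p.1) ∘ TMp) (List.range 8) =
        List.filter (fun k => decide (tokcount k (scan block.toList) ≠ 0)) (List.range 8) := by
      apply List.filter_congr
      intro k hk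
      have hk8 : k < 8 := List.mem_range.mp hk
      show (cFold PySem.Dict.empty (scan block.toList)).contains (strOld k) = _
      rw [contains_cFold]
      have hmem : (strOld k ∈ keysOf (scan block.toList)) ↔ tokcount k (scan block.toList) ≠ 0 := by
        rw [← List.count_pos_iff, keysOf_count (scan block.toList) hwf k hk8]
        omega
      simp [hmem]
    rw [hfc]
    symm
    apply List.map_congr_left
    intro k hkf
    have hk8 : k < 8 := List.mem_range.mp (List.mem_of_mem_filter hkf)
    show strOld k ++ " -> " ++ ((PySem.Str.split? (strNew k) ":").getD []).getD 1 "" ++ " x" ++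
        PySem.Int.toStr ((cFold PySem.Dict.empty (scan block.toList)).getD (strOld k) 0) = _
    rw [getD_cFold, keysOf_count (scan block.toList) hwf k hk8]
    rfl
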